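-- pv_equiv track=rewrite | github.com/Benson1198/31-Days-of-CP | Day 13/118B(Codeforces).py | symm_print
-- ===== SOURCE A (Python) =====
-- def symm_print(n):
--     lst = []
--     rev_lst = []
--     for i in range(n+1):
--         lst.append(i)
--     for j in range(n-1,-1,-1):
--         rev_lst.append(j)
--     sum_lst = lst + rev_lst
--
--     s_new = ' '.join(str(j) for j in sum_lst)
--
--     return s_new
-- ===== SOURCE B (Python) =====
-- def symm_print(n):
--     return ' '.join(str(n - abs(n - i)) for i in range(2 * n + 1))
-- ===== Notes on version B (the rewrite author's own statement) =====
-- stated objective: simpler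
-- what changed: Replaces the two separate range loops building a forward list and a reversed list plus concatenation by one comprehension over range(2n+1) computing each element in closed form as n - abs(n - i).
import Mathlib
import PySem

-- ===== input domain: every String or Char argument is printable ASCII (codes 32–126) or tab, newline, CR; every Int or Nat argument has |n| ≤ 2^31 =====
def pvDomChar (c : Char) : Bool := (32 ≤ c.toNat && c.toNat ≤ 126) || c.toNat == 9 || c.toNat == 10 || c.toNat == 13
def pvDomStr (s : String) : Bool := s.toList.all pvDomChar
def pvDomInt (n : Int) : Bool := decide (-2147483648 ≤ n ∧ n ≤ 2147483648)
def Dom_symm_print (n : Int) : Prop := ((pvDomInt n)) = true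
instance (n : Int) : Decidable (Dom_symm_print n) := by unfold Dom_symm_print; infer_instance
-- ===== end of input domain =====

-- B replaces the two range loops plus list concatenation by one pass computing n - |n - i| over range(2n+1): simpler decomposition, same cost.

-- ===== PORT A =====
def symm_print (n : Int) : String :=
  let lst := (PySem.List.pyRange 0 (n + 1) 1).foldl (fun acc i => acc ++ [i]) []
  let rev_lst := (PySem.List.pyRange (n - 1) (-1) (-1)).foldl (fun acc j => acc ++ [j]) []
  let sum_lst := lst ++ rev_lst
  PySem.Str.join " " (sum_lst.map PySem.Int.toStr)

-- ===== PORT B =====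
def symm_print_alt (n : Int) : String :=
  PySem.Str.join " " ((PySem.List.pyRange 0 (2 * n + 1) 1).map (fun i => PySem.Int.toStr (n - |n - i|)))

-- ===== PRECONDITION & SPEC =====
def Spec_symm_print (n : Int) (out : String) : Prop := out = symm_print_alt n
instance (n : Int) (out : String) : Decidable (Spec_symm_print n out) := by unfold Spec_symm_print; infer_instance

-- ===== CLAIM (what is proved, stated in full; the proofs are below) =====
def Claim_equal_symm_print : Prop := ∀ (n : Int), Dom_symm_print n → Spec_symm_print n (symm_print n)

-- ===== LEMMAS AND PROOFS =====

theorem pv_foldl_app (l acc : List Int) : l.foldl (fun a i => a ++ [i]) acc = acc ++ l := by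
  induction l generalizing acc with
  | nil => simp
  | cons x xs ih => simp [List.foldl, ih]

theorem pv_lists_eq (n : Int) :
    PySem.List.pyRange 0 (n + 1) 1 ++ PySem.List.pyRange (n - 1) (-1) (-1)
      = (PySem.List.pyRange 0 (2 * n + 1) 1).map (fun i => n - |n - i|) := by
  rcases lt_or_ge n 0 with hn | hn
  · rw [PySem.List.pyRange_one_eq_nil (by omega), PySem.List.pyRange_neg_one_eq_nil (by omega),
      PySem.List.pyRange_one_eq_nil (by omega)]
    simp
  · rw [PySem.List.pyRange_one_append 0 (n + 1) (2 * n + 1) (by omega) (by omega), List.map_append]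
    congr 1
    · rw [List.map_congr_left (fun i hi => ?_), List.map_id]
      rw [PySem.List.mem_pyRange_one] at hi
      simp only [id_eq]
      rw [abs_of_nonneg (by omega)]
      omega
    · rw [PySem.List.pyRange_neg_one, PySem.List.pyRange_one, List.map_map]
      have : (2 * n + 1 - (n + 1)).toNat = (n - 1 - (-1)).toNat := by omega
      rw [this]
      apply List.map_congr_left
      intro k hk
      simp only [Function.comp]
      have hk' : (k : Int) ≥ 0 := Int.natCast_nonneg k
      have : |n - (n + 1 + k)| = 1 + k := by
        rw [abs_of_nonpos (by omega)]; ring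
      rw [this]; ring

theorem symm_print_eq (n : Int) : symm_print n = symm_print_alt n := by
  unfold symm_print symm_print_alt
  simp only [pv_foldl_app, List.nil_append]
  rw [pv_lists_eq, List.map_map]
  rfl

-- ===== VERDICT (by name: the statement is the Claim_ definition above) =====
theorem symm_print_spec : Claim_equal_symm_print := by
  intro n _
  exact symm_print_eq n
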